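-- pv_equiv track=rewrite | github.com/myeongHeonn/Algorithm | 프로그래머스/2/389479. 서버 증설 횟수/서버 증설 횟수.py | solution
-- ===== SOURCE A (Python) =====
-- def solution(players, m, k):
--     answer = 0
--     server = []
--
--     for player_num in players:
--         need_server = player_num // m
--         now_server = len(server)
--
--         if now_server < need_server:
--             for _ in range(need_server - now_server):
--                 server.append(k)
--                 answer += 1
--
--         if server:
--             for i in range(len(server)):
--                 server[i] = server[i] - 1
--
--         while 0 in server:
--             server.remove(0)
--
--     return answer
-- ===== SOURCE B (Python) =====
-- def solution(players, m, k):
--     # One pass with an active-server counter and an expiry schedule keyed by hour,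
--     # instead of rescanning/decrementing a list of per-server lifetimes every hour.
--     answer = 0
--     active = 0
--     expire = {}
--     for i, p in enumerate(players):
--         active -= expire.get(i, 0)
--         need = p // m
--         if active < need:
--             added = need - active
--             answer += added
--             active = need
--             expire[i + k] = added
--     return answer
-- ===== Notes on version B (the rewrite author's own statement) =====
-- stated objective: alternative
-- what changed: Replaces the per-hour mutable list of server lifetimes (append / decrement-every-element / repeated remove(0) scans) with a single pass keeping an active-server counter and a dict scheduling how many servers expire at each future hour.
import Mathlib
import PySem

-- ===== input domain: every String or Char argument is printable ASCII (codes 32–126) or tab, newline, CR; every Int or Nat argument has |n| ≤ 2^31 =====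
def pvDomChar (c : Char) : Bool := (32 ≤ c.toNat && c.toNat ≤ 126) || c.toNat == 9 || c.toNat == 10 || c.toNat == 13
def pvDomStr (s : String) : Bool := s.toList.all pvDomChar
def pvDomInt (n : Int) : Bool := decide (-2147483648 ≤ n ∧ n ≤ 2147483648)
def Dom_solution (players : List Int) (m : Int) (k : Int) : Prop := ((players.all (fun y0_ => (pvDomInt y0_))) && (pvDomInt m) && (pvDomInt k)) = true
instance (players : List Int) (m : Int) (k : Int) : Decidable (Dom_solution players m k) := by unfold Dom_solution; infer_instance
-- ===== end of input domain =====

-- B replaces A's mutable lifetime list (append / decrement-all / remove(0) scans each hour)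
-- with one pass over the hours keeping an active-server count and an expiry dict; return values agree.

-- ===== PORT A =====
-- `while 0 in server: server.remove(0)` — repeatedly erase the first 0 (List.erase = list.remove, exact)
def pvRemoveZeros (l : List Int) : List Int :=
  if h0 : (0 : Int) ∈ l then pvRemoveZeros (l.erase 0) else l
termination_by l.length
decreasing_by
  have := List.length_erase_of_mem h0
  have : 0 < l.length := List.length_pos_of_mem h0
  omega

-- body of A's outer `for player_num in players` loop, state = (answer, server)
def pvStepA (m k : Int) (st : Int × List Int) (p : Int) : Int × List Int :=
  let need := PySem.Int.floordiv p m
  let now : Int := st.2.length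
  -- `for _ in range(need - now): server.append(k); answer += 1`
  let st1 := if now < need then
      (PySem.List.pyRange 0 (need - now) 1).foldl
        (fun (s : Int × List Int) _ => (s.1 + 1, s.2 ++ [k])) st
    else st
  -- `if server: for i in range(len(server)): server[i] = server[i] - 1` (in-place elementwise = map)
  let server1 := if st1.2 ≠ [] then st1.2.map (fun v => v - 1) else st1.2
  (st1.1, pvRemoveZeros server1)

def solution (players : List Int) (m : Int) (k : Int) : Int :=
  (players.foldl (pvStepA m k) (0, [])).1

-- ===== PORT B =====
-- body of B's `for i, p in enumerate(players)` loop, state = (answer, active, expire)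
def pvStepB (m k : Int) (st : Int × Int × PySem.Dict Int Int) (ip : Int × Int) :
    Int × Int × PySem.Dict Int Int :=
  let active := st.2.1 - (st.2.2).getD ip.1 0
  let need := PySem.Int.floordiv ip.2 m
  if active < need then
    (st.1 + (need - active), need, (st.2.2).insert (ip.1 + k) (need - active))
  else
    (st.1, active, st.2.2)

def solution_alt (players : List Int) (m : Int) (k : Int) : Int :=
  ((PySem.List.enumerate players 0).foldl (pvStepB m k) (0, 0, PySem.Dict.empty)).1

-- ===== PRECONDITION & SPEC =====
-- m = 0 with a nonempty players list makes `player_num // m` raise ZeroDivisionError in Python A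
-- (and in B); nothing else is excluded (with players = [] the loop body never runs and A returns 0).
def Pre_solution (players : List Int) (m : Int) (k : Int) : Prop := players = [] ∨ m ≠ 0
instance (players : List Int) (m : Int) (k : Int) : Decidable (Pre_solution players m k) := by
  unfold Pre_solution; infer_instance
def pvWitness_solution : List Int × Int × Int := ([3, 1, 4, 0, 5], 1, 2)

def Spec_solution (players : List Int) (m : Int) (k : Int) (out : Int) : Prop := out = solution_alt players m k
instance (players : List Int) (m : Int) (k : Int) (out : Int) : Decidable (Spec_solution players m k out) := by unfold Spec_solution; infer_instance

-- ===== CLAIM (what is proved, stated in full; the proofs are below) =====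
def Claim_equal_solution : Prop := ∀ (players : List Int) (m : Int) (k : Int), Dom_solution players m k → Pre_solution players m k → Spec_solution players m k (solution players m k)

-- ===== LEMMAS AND PROOFS =====

-- the simulation invariant relating A's lifetime list to B's (active, expire) before hour t
def pvInv (k t : Int) (server : List Int) (active : Int) (expire : PySem.Dict Int Int) : Prop :=
  ((server.length : Int) = active - expire.getD t 0)
  ∧ (∀ d : Int, 1 ≤ d → ((server.count d : Int) = expire.getD (t + d) 0))
  ∧ (∀ v ∈ server, v < k)

theorem pv_filter_erase (l : List Int) :
    (l.erase 0).filter (fun v => decide (v ≠ 0)) = l.filter (fun v => decide (v ≠ 0)) := by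
  induction l with
  | nil => simp
  | cons a l ih =>
    by_cases h : a = 0
    · subst h; simp
    · simp only [List.erase_cons, beq_iff_eq, h, if_false]
      simp only [List.filter_cons]
      simpa [h] using congrArg (fun t => if (decide (a ≠ 0)) = true then a :: t else t) ih

theorem pvRemoveZeros_eq_filter (l : List Int) :
    pvRemoveZeros l = l.filter (fun v => decide (v ≠ 0)) := by
  induction hn : l.length using Nat.strong_induction_on generalizing l with
  | _ n ih =>
    rw [pvRemoveZeros]
    split
    · next h =>
      have hlt : (l.erase 0).length < n := by
        have := List.length_erase_of_mem h
        have := List.length_pos_of_mem h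
        omega
      rw [ih _ hlt _ rfl, pv_filter_erase]
    · next h =>
      symm
      rw [List.filter_eq_self]
      intro a ha
      simp only [decide_eq_true_eq]
      intro e
      exact h (e ▸ ha)

theorem pv_foldAppend (k : Int) (r : List Int) (a : Int) (s : List Int) :
    (r.foldl (fun (st : Int × List Int) _ => (st.1 + 1, st.2 ++ [k])) (a, s))
      = (a + r.length, s ++ List.replicate r.length k) := by
  induction r generalizing a s with
  | nil => simp
  | cons x r ih =>
    simp only [List.foldl_cons, ih, List.length_cons, List.replicate_succ, Prod.mk.injEq]
    constructor
    · push_cast; ring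
    · simp

theorem pv_if_map (l : List Int) (f : Int → Int) :
    (if l ≠ [] then l.map f else l) = l.map f := by
  cases l <;> simp

theorem pv_len_filter_ne (l : List Int) :
    (l.filter (fun v => decide (v ≠ 0))).length + l.count 0 = l.length := by
  induction l with
  | nil => simp
  | cons a l ih =>
    by_cases h : a = 0 <;> simp [h] at ih ⊢ <;> omega

theorem pv_count_map_sub_one (s : List Int) (d : Int) :
    (s.map (fun v => v - 1)).count d = s.count (d + 1) := by
  have hinj : Function.Injective (fun v : Int => v - 1) := by
    intro a b h
    simp only at h
    omega
  have := List.count_map_of_injective s (fun v : Int => v - 1) hinj (d + 1)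
  simpa using this

theorem pvStepA_eq (m k : Int) (ans : Int) (server : List Int) (p : Int) :
    pvStepA m k (ans, server) p =
      (ans + max 0 (PySem.Int.floordiv p m - server.length),
       ((server ++ List.replicate (PySem.Int.floordiv p m - server.length).toNat k).map
           (fun v => v - 1)).filter (fun v => decide (v ≠ 0))) := by
  unfold pvStepA
  by_cases hc : (server.length : Int) < PySem.Int.floordiv p m
  · simp only [if_pos hc, pv_foldAppend, PySem.List.length_pyRange_one]
    rw [pv_if_map, pvRemoveZeros_eq_filter]
    have h00 : PySem.Int.floordiv p m - (server.length : Int) - 0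
        = PySem.Int.floordiv p m - server.length := by ring
    rw [h00]
    have h0 : (((PySem.Int.floordiv p m - (server.length : Int)).toNat : Int))
        = PySem.Int.floordiv p m - server.length := by omega
    have hmax : max 0 (PySem.Int.floordiv p m - (server.length : Int))
        = PySem.Int.floordiv p m - server.length := by omega
    rw [h0, hmax]
  · simp only [if_neg hc]
    have h0 : (PySem.Int.floordiv p m - server.length).toNat = 0 := by omega
    have h1 : max 0 (PySem.Int.floordiv p m - (server.length : Int)) = 0 := by omega
    rw [pv_if_map, pvRemoveZeros_eq_filter, h0, h1]
    simp

theorem pv_inv_preserve (k t : Int) (server : List Int) (active : Int)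
    (expire expire' : PySem.Dict Int Int) (n : Nat)
    (hInv : pvInv k t server active expire)
    (hE : ∀ x, expire'.getD x 0 = if 0 < n ∧ x = t + k then (n : Int) else expire.getD x 0) :
    pvInv k (t + 1)
      (((server ++ List.replicate n k).map (fun v => v - 1)).filter (fun v => decide (v ≠ 0)))
      ((server.length : Int) + n) expire' := by
  obtain ⟨h1, h2, h3⟩ := hInv
  have hck : server.count k = 0 := by
    rw [List.count_eq_zero]
    intro hmem
    exact absurd (h3 k hmem) (lt_irrefl k)
  have hcnt : ∀ d : Int, (server ++ List.replicate n k).count d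
      = server.count d + if k = d then n else 0 := by
    intro d
    rw [List.count_append, List.count_replicate]
    simp [beq_iff_eq]
  refine ⟨?_, ?_, ?_⟩
  · -- length component
    have hL := pv_len_filter_ne ((server ++ List.replicate n k).map (fun v => v - 1))
    rw [pv_count_map_sub_one] at hL
    simp only [List.length_map, List.length_append, List.length_replicate, zero_add] at hL
    have hcc := hcnt 1
    have hd1 := h2 1 (le_refl 1)
    have hE1 := hE (t + 1)
    rw [hE1]
    by_cases hk : k = 1
    · subst hk
      have hcc' : List.count 1 (server ++ List.replicate n 1) = n := by
        rw [hcc, hck, zero_add]; simp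
      rw [hck] at hd1
      push_cast at hd1
      rw [hcc'] at hL
      by_cases hn : 0 < n
      · rw [if_pos ⟨hn, rfl⟩]
        omega
      · have hn0 : n = 0 := by omega
        subst hn0
        simp only [lt_irrefl, false_and, if_false]
        omega
    · have hne : ¬(0 < n ∧ t + 1 = t + k) := by rintro ⟨_, h⟩; exact hk (by omega)
      rw [if_neg hne, if_neg hk] at *
      rw [hcc] at hL
      omega
  · -- count component
    intro d hd
    have hd0 : d ≠ 0 := by omega
    rw [List.count_filter (by simp [hd0]), pv_count_map_sub_one, hcnt]
    have hE1 := hE (t + 1 + d)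
    have hd2 := h2 (d + 1) (by omega)
    have ht : t + (d + 1) = t + 1 + d := by ring
    rw [ht] at hd2
    by_cases hk : k = d + 1
    · subst hk
      rw [hck]
      rw [hck] at hd2
      by_cases hn : 0 < n
      · rw [if_pos ⟨hn, by ring⟩] at hE1
        rw [hE1]
        simp
      · have hn0 : n = 0 := by omega
        subst hn0
        simp only [hn, false_and, if_false] at hE1
        rw [hE1, ← hd2]
        simp
    · have : t + 1 + d ≠ t + k := by intro h; exact hk (by omega)
      rw [if_neg (by rintro ⟨_, h⟩; exact this h)] at hE1
      rw [hE1, ← hd2, if_neg hk]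
      simp
  · -- bound component
    intro v hv
    have hv' := List.mem_of_mem_filter hv
    obtain ⟨u, hu, rfl⟩ := List.mem_map.mp hv'
    rcases List.mem_append.mp hu with hu | hu
    · have := h3 u hu; omega
    · have := List.eq_of_mem_replicate hu; omega

theorem pv_main (m k : Int) (l : List Int) :
    ∀ (t ansA active : Int) (server : List Int) (expire : PySem.Dict Int Int),
    pvInv k t server active expire →
    (l.foldl (pvStepA m k) (ansA, server)).1
      = ((PySem.List.enumerate l t).foldl (pvStepB m k) (ansA, active, expire)).1 := by
  induction l with
  | nil => intro t ansA active server expire _; simp [PySem.List.enumerate_nil]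
  | cons p l ih =>
    intro t ansA active server expire hInv
    have h1 := hInv.1
    rw [PySem.List.enumerate_cons]
    simp only [List.foldl_cons]
    rw [pvStepA_eq]
    have hact : active - expire.getD t 0 = (server.length : Int) := by omega
    by_cases hc : (server.length : Int) < PySem.Int.floordiv p m
    · have hB : pvStepB m k (ansA, active, expire) (t, p)
          = (ansA + (PySem.Int.floordiv p m - server.length), PySem.Int.floordiv p m,
             expire.insert (t + k) (PySem.Int.floordiv p m - server.length)) := by
        unfold pvStepB
        simp only [hact]
        rw [if_pos hc]
      rw [hB]
      have hmax : max 0 (PySem.Int.floordiv p m - (server.length : Int))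
          = PySem.Int.floordiv p m - server.length := by omega
      rw [hmax]
      have hn : ((( PySem.Int.floordiv p m - (server.length : Int)).toNat : Int))
          = PySem.Int.floordiv p m - server.length := by omega
      have hinv' := pv_inv_preserve k t server active expire
        (expire.insert (t + k) (PySem.Int.floordiv p m - server.length))
        (PySem.Int.floordiv p m - server.length).toNat hInv ?_
      · have hact' : (server.length : Int) + ((PySem.Int.floordiv p m - (server.length : Int)).toNat : Int)
            = PySem.Int.floordiv p m := by omega
        rw [hact'] at hinv'
        exact ih (t + 1) _ _ _ _ hinv'
      · intro x
        rw [PySem.Dict.getD_insert]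
        by_cases hx : x = t + k
        · rw [if_pos hx, if_pos ⟨by omega, hx⟩, hn]
        · rw [if_neg hx, if_neg (by rintro ⟨_, h⟩; exact hx h)]
    · have hB : pvStepB m k (ansA, active, expire) (t, p)
          = (ansA, (server.length : Int), expire) := by
        unfold pvStepB
        simp only [hact]
        rw [if_neg hc]
      rw [hB]
      have hmax : max 0 (PySem.Int.floordiv p m - (server.length : Int)) = 0 := by omega
      have hn0 : (PySem.Int.floordiv p m - (server.length : Int)).toNat = 0 := by omega
      rw [hmax, hn0, add_zero]
      simp only [List.replicate_zero, List.append_nil]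
      have hinv' := pv_inv_preserve k t server active expire expire 0 hInv (by intro x; simp)
      simp only [List.replicate_zero, List.append_nil, Nat.cast_zero, add_zero] at hinv'
      exact ih (t + 1) _ _ _ _ hinv'

-- ===== VERDICT (by name: the statement is the Claim_ definition above) =====
theorem solution_spec : Claim_equal_solution := by
  intro players m k _ _
  unfold Spec_solution solution solution_alt
  exact pv_main m k players 0 0 0 [] PySem.Dict.empty (by simp [pvInv])
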